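-- pv_equiv track=rewrite | github.com/ntnhan0605/docs-ntnhan0605 | algorithm/bigo_blue50/05-breadth-first-search/dhoom_4.py | dhoom_4
-- ===== SOURCE A (Python) =====
-- import queue
--
-- def dhoom_4(arr, n, x, z):
-- 	q = queue.Queue()
-- 	dist = [-1] * 1_00_001
-- 	q.put(x)
-- 	dist[x] = 0
-- 	while not q.empty():
-- 		u = q.get()
-- 		for i in range(n):
-- 			v = (u * arr[i]) % 1_00_000
-- 			if dist[v] == -1:
-- 				dist[v] = dist[u] + 1
-- 				if v == z:
-- 					return dist[z]
-- 				q.put(v)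
-- 	return dist[z]
-- ===== SOURCE B (Python) =====
-- def dhoom_4(arr, n, x, z):
--     dist = [-1] * 100001
--     dist[x] = 0
--     frontier = [x]
--     level = 0
--     while frontier:
--         nxt = []
--         for u in frontier:
--             for i in range(n):
--                 v = (u * arr[i]) % 100000
--                 if dist[v] == -1:
--                     dist[v] = level + 1
--                     nxt.append(v)
--         frontier = nxt
--         level += 1
--     return dist[z]
-- ===== Notes on version B (the rewrite author's own statement) =====
-- stated objective: simpler
-- what changed: Replaces A's queue.Queue FIFO BFS with per-node stored distances and a mid-loop early return by a level-synchronized frontier BFS that keeps only a level counter, fills the whole distance table and reads dist[z] once at the end (no queue module, no early exit).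
-- outside the precondition, e.g. on dhoom_4([6, 1, 6, 0, 1], 6, 6, 0): A returns 1, B raises IndexError
import Mathlib
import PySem

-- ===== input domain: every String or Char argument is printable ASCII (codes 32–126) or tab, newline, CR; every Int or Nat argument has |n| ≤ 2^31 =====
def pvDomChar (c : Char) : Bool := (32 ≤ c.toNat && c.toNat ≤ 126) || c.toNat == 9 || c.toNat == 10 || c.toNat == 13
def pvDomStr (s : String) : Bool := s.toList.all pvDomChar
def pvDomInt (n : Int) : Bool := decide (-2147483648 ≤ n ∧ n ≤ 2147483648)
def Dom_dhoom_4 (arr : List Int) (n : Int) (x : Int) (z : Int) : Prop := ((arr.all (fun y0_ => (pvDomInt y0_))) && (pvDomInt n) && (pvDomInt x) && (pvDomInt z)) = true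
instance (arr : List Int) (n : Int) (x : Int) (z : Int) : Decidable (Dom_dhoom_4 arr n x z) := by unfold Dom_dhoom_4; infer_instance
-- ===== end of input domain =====

-- B replaces A's single FIFO queue (with per-node dist values and an early return) by a
-- level-synchronized frontier BFS that fills the whole distance table and reads dist[z] once
-- at the end: no queue module, no early exit, a plain level counter (objective: simpler).

-- ===== PORT A =====
-- Python list indexing dist[i] (length 100001): negative indices wrap; reads/writes outside
-- the valid range only occur on inputs excluded by Pre_ (Python raises IndexError there).
def nIdx (i : Int) : Nat := (if i < 0 then i + 100001 else i).toNat

def distGet (d : Array Int) (i : Int) : Int := d.getD (nIdx i) 0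

def distSet (d : Array Int) (i : Int) (w : Int) : Array Int := d.setIfInBounds (nIdx i) w

-- number of cells still equal to -1 (used only to compute a provably sufficient fuel bound
-- that makes the while-loops total; A's loop runs at most countNeg+1 iterations)
def countNeg (d : Array Int) : Nat := d.toList.count (-1)

-- A's inner `for i in range(n)` with its early `return dist[z]`: Sum.inr r = early return.
def innerA (arr : List Int) (z u : Int) : Array Int → List Int → (Array Int × List Int) ⊕ Int
  | d, [] => Sum.inl (d, [])
  | d, i :: rest =>
    let v := PySem.Int.mod (u * PySem.List.pyGetD arr i 0) 100000
    if distGet d v = -1 then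
      let d' := distSet d v (distGet d u + 1)
      if v = z then Sum.inr (distGet d' z)
      else
        match innerA arr z u d' rest with
        | Sum.inl (d2, adds) => Sum.inl (d2, v :: adds)
        | Sum.inr r => Sum.inr r
    else innerA arr z u d rest

-- A's `while not q.empty()` loop; the queue is the list, fuel only makes it total.
def loopA (arr : List Int) (n z : Int) : Nat → Array Int → List Int → Int
  | 0, d, _ => distGet d z
  | _ + 1, d, [] => distGet d z
  | fuel + 1, d, u :: rest =>
    match innerA arr z u d (PySem.List.pyRange 0 n 1) with
    | Sum.inr r => r
    | Sum.inl (d', adds) => loopA arr n z fuel d' (rest ++ adds)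

def dhoom_4 (arr : List Int) (n : Int) (x : Int) (z : Int) : Int :=
  let d := distSet (Array.replicate 100001 (-1)) x 0
  loopA arr n z (2 * countNeg d + 2) d [x]

-- ===== PORT B =====
-- B's inner `for i in range(n)` body: mark v with level+1 and append it to nxt.
def bodyB (arr : List Int) (level u : Int) (p : Array Int × List Int) (i : Int) : Array Int × List Int :=
  let v := PySem.Int.mod (u * PySem.List.pyGetD arr i 0) 100000
  if distGet p.1 v = -1 then (distSet p.1 v (level + 1), p.2 ++ [v]) else p

def stepB (arr : List Int) (n level : Int) (p : Array Int × List Int) (u : Int) : Array Int × List Int :=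
  (PySem.List.pyRange 0 n 1).foldl (bodyB arr level u) p

-- B's `while frontier` loop; fuel only makes it total (at most countNeg+2 levels happen).
def levelLoop (arr : List Int) (n : Int) : Nat → Array Int → List Int → Int → Array Int
  | 0, d, _, _ => d
  | _ + 1, d, [], _ => d
  | fuel + 1, d, frontier, level =>
    let p := frontier.foldl (stepB arr n level) (d, [])
    levelLoop arr n fuel p.1 p.2 (level + 1)

def dhoom_4_alt (arr : List Int) (n : Int) (x : Int) (z : Int) : Int :=
  let d := distSet (Array.replicate 100001 (-1)) x 0
  distGet (levelLoop arr n (countNeg d + 2) d [x] 0) z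

-- ===== PRECONDITION & SPEC =====
-- Pre_ excludes the inputs where Python raises IndexError: x or z not a valid (possibly
-- negative) index into the length-100001 list, or n > len(arr).  With n > len(arr) A can
-- still return when its early `return` fires before the loop reaches the bad index, a value
-- B cannot reproduce because B's level BFS has no early exit and always raises there.
def Pre_dhoom_4 (arr : List Int) (n : Int) (x : Int) (z : Int) : Prop :=
  -100001 ≤ x ∧ x ≤ 100000 ∧ -100001 ≤ z ∧ z ≤ 100000 ∧ n ≤ (arr.length : Int)
instance (arr : List Int) (n : Int) (x : Int) (z : Int) : Decidable (Pre_dhoom_4 arr n x z) := by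
  unfold Pre_dhoom_4; infer_instance

def pvWitness_dhoom_4 : List Int × Int × Int × Int := ([3, 7], 2, 1, 63)

def Spec_dhoom_4 (arr : List Int) (n : Int) (x : Int) (z : Int) (out : Int) : Prop := out = dhoom_4_alt arr n x z
instance (arr : List Int) (n : Int) (x : Int) (z : Int) (out : Int) : Decidable (Spec_dhoom_4 arr n x z out) := by unfold Spec_dhoom_4; infer_instance

-- ===== CLAIM (what is proved, stated in full; the proofs are below) =====
def Claim_equal_dhoom_4 : Prop := ∀ (arr : List Int) (n : Int) (x : Int) (z : Int), Dom_dhoom_4 arr n x z → Pre_dhoom_4 arr n x z → Spec_dhoom_4 arr n x z (dhoom_4 arr n x z)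

-- ===== LEMMAS AND PROOFS =====

-- all cells of the table are ≥ -1 and the table has Python's length
def InvD (d : Array Int) : Prop := d.size = 100001 ∧ ∀ j : Nat, -1 ≤ d.getD j 0

theorem size_distSet (d : Array Int) (i w : Int) : (distSet d i w).size = d.size := by
  simp [distSet]

theorem distGet_distSet_same (d : Array Int) (i j w : Int) (hij : nIdx j = nIdx i)
    (h : nIdx i < d.size) : distGet (distSet d i w) j = w := by
  simp [distGet, distSet, Array.getD_eq_getD_getElem?, hij, h]

theorem distGet_distSet_other (d : Array Int) (i j w : Int) (hij : nIdx j ≠ nIdx i) :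
    distGet (distSet d i w) j = distGet d j := by
  simp [distGet, distSet, Array.getD_eq_getD_getElem?, Ne.symm hij]

theorem getD_distSet_nat (d : Array Int) (i w : Int) (j : Nat) :
    (distSet d i w).getD j 0 = if j = nIdx i ∧ nIdx i < d.size then w else d.getD j 0 := by
  by_cases hj : j = nIdx i
  · subst hj
    by_cases h : nIdx i < d.size <;>
      simp [distSet, Array.getD_eq_getD_getElem?, h]
  · simp [distSet, Array.getD_eq_getD_getElem?, Ne.symm hj, hj]

theorem invD_distSet (d : Array Int) (i w : Int) (h : InvD d) (hw : -1 ≤ w) :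
    InvD (distSet d i w) := by
  refine ⟨by simp [size_distSet, h.1], fun j => ?_⟩
  rw [getD_distSet_nat]
  split
  · exact hw
  · exact h.2 j

theorem toList_cell (d : Array Int) (i : Int) (hin : nIdx i < d.size) :
    d.toList[nIdx i]! = distGet d i := by
  simp only [distGet, Array.getD_eq_getD_getElem?]
  rw [Array.getElem?_eq_getElem hin]
  have hlen : nIdx i < d.toList.length := by simpa using hin
  rw [List.getElem!_eq_getElem?_getD, List.getElem?_eq_getElem hlen]
  simp [Array.getElem_toList]

theorem countNeg_distSet_le (d : Array Int) (i w : Int) (hold : distGet d i = -1) :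
    countNeg (distSet d i w) ≤ countNeg d := by
  by_cases h : nIdx i < d.size
  · have hlen : nIdx i < d.toList.length := by simpa using h
    have hcell : d.toList[nIdx i] = -1 := by
      have := toList_cell d i h
      rw [hold] at this
      simpa [List.getElem!_eq_getElem?_getD, List.getElem?_eq_getElem hlen] using this
    have hcount : 0 < d.toList.count (-1 : Int) := by
      refine List.count_pos_iff.mpr ?_
      rw [← hcell]; exact List.getElem_mem hlen
    simp only [countNeg, distSet, Array.toList_setIfInBounds]
    rw [List.count_set hlen]
    simp only [hcell, beq_self_eq_true, if_true]
    by_cases hw2 : w = -1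
    · simp only [hw2, beq_self_eq_true, if_true]
      omega
    · simp only [beq_iff_eq, if_neg hw2]
      omega
  · have : distSet d i w = d := by
      simp [distSet, Array.setIfInBounds, h]
    rw [this]

theorem countNeg_distSet_lt (d : Array Int) (i w : Int) (hin : nIdx i < d.size)
    (hold : distGet d i = -1) (hw : w ≠ -1) :
    countNeg (distSet d i w) + 1 ≤ countNeg d := by
  have hlen : nIdx i < d.toList.length := by simpa using hin
  have hcell : d.toList[nIdx i] = -1 := by
    have := toList_cell d i hin
    rw [hold] at this
    simpa [List.getElem!_eq_getElem?_getD, List.getElem?_eq_getElem hlen] using this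
  have hcount : 0 < d.toList.count (-1 : Int) := by
    refine List.count_pos_iff.mpr ?_
    rw [← hcell]; exact List.getElem_mem hlen
  simp only [countNeg, distSet, Array.toList_setIfInBounds]
  rw [List.count_set hlen]
  simp only [hcell, beq_self_eq_true, if_true, beq_iff_eq, if_neg hw]
  omega

theorem distGet_distSet_preserve (d : Array Int) (i w j : Int) (hold : distGet d i = -1)
    (hj : distGet d j ≠ -1) : distGet (distSet d i w) j = distGet d j := by
  by_cases hij : nIdx j = nIdx i
  · exact absurd (by simpa [distGet, hij] using hold) hj
  · exact distGet_distSet_other d i j w hij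

theorem v_nonneg (u a : Int) : 0 ≤ PySem.Int.mod (u * a) 100000 :=
  PySem.Int.mod_nonneg _ (by norm_num)

theorem v_lt (u a : Int) : PySem.Int.mod (u * a) 100000 < 100000 :=
  PySem.Int.mod_lt _ (by norm_num)

theorem nIdx_lt_of_small (v : Int) (h0 : 0 ≤ v) (h1 : v < 100000) : nIdx v < 100001 := by
  simp only [nIdx, if_neg (not_lt.mpr h0)]
  omega

-- cumulative facts about B's inner multiplier fold: it cannot increase the number of -1
-- cells, it never touches a cell that is already ≠ -1, and it preserves InvD
theorem foldB_facts (arr : List Int) (level u : Int) (idxs : List Int) :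
    ∀ p : Array Int × List Int,
      countNeg (idxs.foldl (bodyB arr level u) p).1 ≤ countNeg p.1 ∧
      (∀ j, distGet p.1 j ≠ -1 → distGet (idxs.foldl (bodyB arr level u) p).1 j = distGet p.1 j) ∧
      (InvD p.1 → -1 ≤ level + 1 → InvD (idxs.foldl (bodyB arr level u) p).1) := by
  induction idxs with
  | nil => intro p; exact ⟨le_refl _, fun j _ => rfl, fun h _ => h⟩
  | cons i rest ih =>
    intro p
    simp only [List.foldl_cons]
    by_cases hg : distGet p.1 (PySem.Int.mod (u * PySem.List.pyGetD arr i 0) 100000) = -1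
    · have hb : bodyB arr level u p i =
          (distSet p.1 (PySem.Int.mod (u * PySem.List.pyGetD arr i 0) 100000) (level + 1),
            p.2 ++ [PySem.Int.mod (u * PySem.List.pyGetD arr i 0) 100000]) := by
        simp only [bodyB, if_pos hg]
      rw [hb]
      obtain ⟨ihc, ihp, ihi⟩ := ih (distSet p.1 (PySem.Int.mod (u * PySem.List.pyGetD arr i 0) 100000) (level + 1),
            p.2 ++ [PySem.Int.mod (u * PySem.List.pyGetD arr i 0) 100000])
      refine ⟨le_trans ihc (countNeg_distSet_le _ _ _ hg), fun j hj => ?_, fun h hl => ihi (invD_distSet _ _ _ h hl) hl⟩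
      have h1 := distGet_distSet_preserve p.1 _ (level + 1) j hg hj
      rw [ihp j (by rw [h1]; exact hj), h1]
    · have hb : bodyB arr level u p i = p := by
        simp only [bodyB, if_neg hg]
      rw [hb]
      exact ih p

theorem foldFront_facts (arr : List Int) (n level : Int) (cur : List Int) :
    ∀ p : Array Int × List Int,
      countNeg (cur.foldl (stepB arr n level) p).1 ≤ countNeg p.1 ∧
      (∀ j, distGet p.1 j ≠ -1 → distGet (cur.foldl (stepB arr n level) p).1 j = distGet p.1 j) ∧
      (InvD p.1 → -1 ≤ level + 1 → InvD (cur.foldl (stepB arr n level) p).1) := by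
  induction cur with
  | nil => intro p; exact ⟨le_refl _, fun j _ => rfl, fun h _ => h⟩
  | cons uu rest ih =>
    intro p
    simp only [List.foldl_cons]
    obtain ⟨sc, sp, si⟩ := foldB_facts arr level uu (PySem.List.pyRange 0 n 1) p
    obtain ⟨ihc, ihp, ihi⟩ := ih (stepB arr n level p uu)
    have sc' : countNeg (stepB arr n level p uu).1 ≤ countNeg p.1 := sc
    have si' : InvD p.1 → -1 ≤ level + 1 → InvD (stepB arr n level p uu).1 := si
    refine ⟨le_trans ihc sc', fun j hj => ?_, fun h hl => ihi (si' h hl) hl⟩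
    have h1 : distGet (stepB arr n level p uu).1 j = distGet p.1 j := sp j hj
    rw [ihp j (by rw [h1]; exact hj), h1]

theorem levelLoop_preserve (arr : List Int) (n : Int) :
    ∀ (fuel : Nat) (d : Array Int) (frontier : List Int) (level : Int) (j : Int),
      distGet d j ≠ -1 → distGet (levelLoop arr n fuel d frontier level) j = distGet d j := by
  intro fuel
  induction fuel with
  | zero => intro d frontier level j _; rfl
  | succ f ih =>
    intro d frontier level j hj
    cases frontier with
    | nil => rfl
    | cons a l =>
      obtain ⟨_, sp, _⟩ := foldFront_facts arr n level (a :: l) (d, [])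
      have h1 := sp j hj
      calc distGet (levelLoop arr n (f + 1) d (a :: l) level) j
          = distGet (levelLoop arr n f ((a :: l).foldl (stepB arr n level) (d, [])).1
              ((a :: l).foldl (stepB arr n level) (d, [])).2 (level + 1)) j := rfl
        _ = distGet d j := by rw [ih _ _ _ j (by rw [h1]; exact hj), h1]

-- the central inner-loop correspondence: A's inner for-loop (with early return) against
-- B's inner fold, on the same distance table
theorem inner_sim (arr : List Int) (z u level : Int) (idxs : List Int) :
    ∀ (d : Array Int) (acc : List Int), InvD d → 0 ≤ level → distGet d u = level →
    (∃ d' adds, innerA arr z u d idxs = Sum.inl (d', adds) ∧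
        idxs.foldl (bodyB arr level u) (d, acc) = (d', acc ++ adds) ∧
        InvD d' ∧ distGet d' u = level ∧ countNeg d' + adds.length ≤ countNeg d ∧
        (∀ j, distGet d j ≠ -1 → distGet d' j = distGet d j) ∧
        (∀ a ∈ adds, distGet d' a = level + 1)) ∨
    (innerA arr z u d idxs = Sum.inr (level + 1) ∧
        InvD (idxs.foldl (bodyB arr level u) (d, acc)).1 ∧
        distGet (idxs.foldl (bodyB arr level u) (d, acc)).1 z = level + 1 ∧
        countNeg (idxs.foldl (bodyB arr level u) (d, acc)).1 ≤ countNeg d) := by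
  induction idxs with
  | nil =>
    intro d acc hd hl hu
    exact Or.inl ⟨d, [], rfl, by simp, hd, hu, by simp, fun j h => rfl, by simp⟩
  | cons i rest ih =>
    intro d acc hd hl hu
    by_cases hg : distGet d (PySem.Int.mod (u * PySem.List.pyGetD arr i 0) 100000) = -1
    · -- the write really happens
      have hv0 := v_nonneg u (PySem.List.pyGetD arr i 0)
      have hv1 := v_lt u (PySem.List.pyGetD arr i 0)
      have hvlt : nIdx (PySem.Int.mod (u * PySem.List.pyGetD arr i 0) 100000) < d.size := by
        rw [hd.1]; exact nIdx_lt_of_small _ hv0 hv1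
      have hwrt : distGet d u + 1 = level + 1 := by rw [hu]
      have hd' : InvD (distSet d (PySem.Int.mod (u * PySem.List.pyGetD arr i 0) 100000) (level + 1)) :=
        invD_distSet _ _ _ hd (by omega)
      have hu' : distGet (distSet d (PySem.Int.mod (u * PySem.List.pyGetD arr i 0) 100000) (level + 1)) u = level := by
        rw [distGet_distSet_preserve _ _ _ _ hg (by rw [hu]; omega)]; exact hu
      have hvv : distGet (distSet d (PySem.Int.mod (u * PySem.List.pyGetD arr i 0) 100000) (level + 1))
          (PySem.Int.mod (u * PySem.List.pyGetD arr i 0) 100000) = level + 1 :=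
        distGet_distSet_same _ _ _ _ rfl hvlt
      have hcnt : countNeg (distSet d (PySem.Int.mod (u * PySem.List.pyGetD arr i 0) 100000) (level + 1)) + 1 ≤ countNeg d :=
        countNeg_distSet_lt _ _ _ hvlt hg (by omega)
      have hAstep : innerA arr z u d (i :: rest) =
          (if PySem.Int.mod (u * PySem.List.pyGetD arr i 0) 100000 = z then
            Sum.inr (distGet (distSet d (PySem.Int.mod (u * PySem.List.pyGetD arr i 0) 100000) (level + 1)) z)
          else
            match innerA arr z u (distSet d (PySem.Int.mod (u * PySem.List.pyGetD arr i 0) 100000) (level + 1)) rest with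
            | Sum.inl (d2, adds) => Sum.inl (d2, PySem.Int.mod (u * PySem.List.pyGetD arr i 0) 100000 :: adds)
            | Sum.inr r => Sum.inr r) := by
        rw [show innerA arr z u d (i :: rest) =
          (if distGet d (PySem.Int.mod (u * PySem.List.pyGetD arr i 0) 100000) = -1 then
            (if PySem.Int.mod (u * PySem.List.pyGetD arr i 0) 100000 = z then
              Sum.inr (distGet (distSet d (PySem.Int.mod (u * PySem.List.pyGetD arr i 0) 100000) (distGet d u + 1)) z)
            else
              match innerA arr z u (distSet d (PySem.Int.mod (u * PySem.List.pyGetD arr i 0) 100000) (distGet d u + 1)) rest with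
              | Sum.inl (d2, adds) => Sum.inl (d2, PySem.Int.mod (u * PySem.List.pyGetD arr i 0) 100000 :: adds)
              | Sum.inr r => Sum.inr r)
          else innerA arr z u d rest) from rfl, if_pos hg, hwrt]
      have hBstep : (i :: rest).foldl (bodyB arr level u) (d, acc) =
          rest.foldl (bodyB arr level u)
            (distSet d (PySem.Int.mod (u * PySem.List.pyGetD arr i 0) 100000) (level + 1),
              acc ++ [PySem.Int.mod (u * PySem.List.pyGetD arr i 0) 100000]) := by
        simp only [List.foldl_cons, bodyB, if_pos hg]
      by_cases hz : PySem.Int.mod (u * PySem.List.pyGetD arr i 0) 100000 = z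
      · -- early return: A stops, B keeps going but never changes cell z again
        right
        obtain ⟨rc, rp, ri⟩ := foldB_facts arr level u rest
            (distSet d (PySem.Int.mod (u * PySem.List.pyGetD arr i 0) 100000) (level + 1),
              acc ++ [PySem.Int.mod (u * PySem.List.pyGetD arr i 0) 100000])
        have hzv : distGet (distSet d (PySem.Int.mod (u * PySem.List.pyGetD arr i 0) 100000) (level + 1)) z = level + 1 := by
          rw [← hz]; exact hvv
        refine ⟨?_, ?_, ?_, ?_⟩
        · rw [hAstep, if_pos hz, hzv]
        · rw [hBstep]; exact ri hd' (by omega)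
        · rw [hBstep, rp z (by rw [hzv]; omega), hzv]
        · rw [hBstep]
          refine le_trans rc ?_
          change countNeg (distSet d (PySem.Int.mod (u * PySem.List.pyGetD arr i 0) 100000) (level + 1)) ≤ countNeg d
          omega
      · -- no early return at this multiplier: recurse
        rcases ih (distSet d (PySem.Int.mod (u * PySem.List.pyGetD arr i 0) 100000) (level + 1))
            (acc ++ [PySem.Int.mod (u * PySem.List.pyGetD arr i 0) 100000]) hd' hl hu' with
          ⟨d2, adds2, hA2, hB2, hd2, hu2, hc2, hp2, hv2⟩ | ⟨hA2, hi2, hz2, hc2⟩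
        · left
          refine ⟨d2, PySem.Int.mod (u * PySem.List.pyGetD arr i 0) 100000 :: adds2, ?_, ?_, hd2, hu2, ?_, ?_, ?_⟩
          · rw [hAstep, if_neg hz, hA2]
          · rw [hBstep, hB2]; simp
          · simp only [List.length_cons]; omega
          · intro j hj
            rw [hp2 j (by rw [distGet_distSet_preserve _ _ _ _ hg hj]; exact hj),
              distGet_distSet_preserve _ _ _ _ hg hj]
          · intro a ha
            rcases List.mem_cons.mp ha with h | h
            · subst h; rw [hp2 _ (by rw [hvv]; omega), hvv]
            · exact hv2 a h
        · right
          refine ⟨?_, ?_, ?_, ?_⟩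
          · rw [hAstep, if_neg hz, hA2]
          · rw [hBstep]; exact hi2
          · rw [hBstep]; exact hz2
          · rw [hBstep]; exact le_trans hc2 (by omega)
    · -- untouched multiplier: both sides skip
      have hAstep : innerA arr z u d (i :: rest) = innerA arr z u d rest := by
        rw [show innerA arr z u d (i :: rest) =
          (if distGet d (PySem.Int.mod (u * PySem.List.pyGetD arr i 0) 100000) = -1 then
            (if PySem.Int.mod (u * PySem.List.pyGetD arr i 0) 100000 = z then
              Sum.inr (distGet (distSet d (PySem.Int.mod (u * PySem.List.pyGetD arr i 0) 100000) (distGet d u + 1)) z)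
            else
              match innerA arr z u (distSet d (PySem.Int.mod (u * PySem.List.pyGetD arr i 0) 100000) (distGet d u + 1)) rest with
              | Sum.inl (d2, adds) => Sum.inl (d2, PySem.Int.mod (u * PySem.List.pyGetD arr i 0) 100000 :: adds)
              | Sum.inr r => Sum.inr r)
          else innerA arr z u d rest) from rfl, if_neg hg]
      have hBstep : (i :: rest).foldl (bodyB arr level u) (d, acc) =
          rest.foldl (bodyB arr level u) (d, acc) := by
        simp only [List.foldl_cons, bodyB, if_neg hg]
      rw [hAstep, hBstep]
      exact ih d acc hd hl hu

-- the outer simulation: A's FIFO queue is always (rest of current level ++ next level)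
theorem outer_sim (arr : List Int) (n z : Int) (K : Nat) :
    ∀ (d : Array Int) (cur nxt : List Int) (level : Int) (fa fb : Nat),
      InvD d → 0 ≤ level →
      (∀ u ∈ cur, distGet d u = level) → (∀ v ∈ nxt, distGet d v = level + 1) →
      2 * countNeg d + cur.length + nxt.length + 1 ≤ fa →
      countNeg d + 1 + (if nxt = [] then 0 else 1) ≤ fb →
      2 * (2 * countNeg d + cur.length + nxt.length) + (if cur = [] then 1 else 0) ≤ K →
      loopA arr n z fa d (cur ++ nxt) =
        distGet (levelLoop arr n fb (cur.foldl (stepB arr n level) (d, nxt)).1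
          (cur.foldl (stepB arr n level) (d, nxt)).2 (level + 1)) z := by
  induction K with
  | zero =>
    intro d cur nxt level fa fb _ _ _ _ _ _ hK
    exfalso
    by_cases hc : cur = [] <;> simp [hc] at hK
  | succ K ih =>
    intro d cur nxt level fa fb hd hl hcur hnxt hfa hfb hK
    cases cur with
    | nil =>
      simp only [List.foldl_nil, List.nil_append]
      cases nxt with
      | nil =>
        obtain ⟨fa', rfl⟩ : ∃ fa', fa = fa' + 1 := ⟨fa - 1, by omega⟩
        obtain ⟨fb', rfl⟩ : ∃ fb', fb = fb' + 1 := ⟨fb - 1, by omega⟩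
        rfl
      | cons a l =>
        obtain ⟨fb', rfl⟩ : ∃ fb', fb = fb' + 1 := ⟨fb - 1, by omega⟩
        have hstep : levelLoop arr n (fb' + 1) d (a :: l) (level + 1) =
            levelLoop arr n fb' ((a :: l).foldl (stepB arr n (level + 1)) (d, [])).1
              ((a :: l).foldl (stepB arr n (level + 1)) (d, [])).2 (level + 1 + 1) := rfl
        rw [hstep]
        have := ih d (a :: l) [] (level + 1) fa fb' hd (by omega) hnxt (by simp)
          (by simp at hfa ⊢; omega)
          (by simp at hfb ⊢; omega)
          (by simp at hK ⊢; omega)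
        simpa using this
    | cons u cur' =>
      obtain ⟨fa', rfl⟩ : ∃ fa', fa = fa' + 1 := ⟨fa - 1, by omega⟩
      have hu : distGet d u = level := hcur u (by simp)
      rcases inner_sim arr z u level (PySem.List.pyRange 0 n 1) d nxt hd hl hu with
        ⟨d', adds, hA, hB, hd', hu', hc', hp', hv'⟩ | ⟨hA, hi', hz', hc'⟩
      · -- no early return while processing u
        have hAstep : loopA arr n z (fa' + 1) d ((u :: cur') ++ nxt) =
            loopA arr n z fa' d' ((cur' ++ nxt) ++ adds) := by
          show (match innerA arr z u d (PySem.List.pyRange 0 n 1) with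
            | Sum.inr r => r
            | Sum.inl (d', adds) => loopA arr n z fa' d' ((cur' ++ nxt) ++ adds)) = _
          rw [hA]
        have hBfold : (u :: cur').foldl (stepB arr n level) (d, nxt) =
            cur'.foldl (stepB arr n level) (d', nxt ++ adds) := by
          simp only [List.foldl_cons]
          exact congrArg (fun p => List.foldl (stepB arr n level) p cur') hB
        have hcur' : ∀ w ∈ cur', distGet d' w = level := fun w hw =>
          by rw [hp' w (by rw [hcur w (by simp [hw])]; omega), hcur w (by simp [hw])]
        have hnxt' : ∀ w ∈ nxt ++ adds, distGet d' w = level + 1 := by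
          intro w hw
          rcases List.mem_append.mp hw with h | h
          · rw [hp' w (by rw [hnxt w h]; omega), hnxt w h]
          · exact hv' w h
        have hfa' : 2 * countNeg d' + cur'.length + (nxt ++ adds).length + 1 ≤ fa' := by
          simp only [List.length_append]
          simp only [List.length_cons] at hfa
          omega
        have hfb' : countNeg d' + 1 + (if nxt ++ adds = [] then 0 else 1) ≤ fb := by
          by_cases h1 : nxt = []
          · by_cases h2 : adds = []
            · subst h1; subst h2; simp at hfb ⊢; omega
            · have hlen : 1 ≤ adds.length := List.length_pos_iff.mpr h2
              subst h1; simp [h2] at hfb ⊢; omega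
          · simp [h1] at hfb ⊢; omega
        have hK' : 2 * (2 * countNeg d' + cur'.length + (nxt ++ adds).length) +
            (if cur' = [] then 1 else 0) ≤ K := by
          have hflag : (if cur' = [] then (1 : Nat) else 0) ≤ 1 := by split <;> omega
          simp at hK
          simp only [List.length_append] at hK ⊢
          omega
        have := ih d' cur' (nxt ++ adds) level fa' fb hd' hl hcur' hnxt' hfa' hfb' hK'
        rw [hAstep, hBfold, List.append_assoc]
        exact this
      · -- early return: A answers level+1; B's table keeps cell z at level+1 forever
        have hAstep : loopA arr n z (fa' + 1) d ((u :: cur') ++ nxt) = level + 1 := by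
          show (match innerA arr z u d (PySem.List.pyRange 0 n 1) with
            | Sum.inr r => r
            | Sum.inl (d', adds) => loopA arr n z fa' d' ((cur' ++ nxt) ++ adds)) = _
          rw [hA]
        have hBfold : (u :: cur').foldl (stepB arr n level) (d, nxt) =
            cur'.foldl (stepB arr n level)
              ((PySem.List.pyRange 0 n 1).foldl (bodyB arr level u) (d, nxt)) := by
          simp only [List.foldl_cons]; rfl
        obtain ⟨fc, fp, fi⟩ := foldFront_facts arr n level cur'
          ((PySem.List.pyRange 0 n 1).foldl (bodyB arr level u) (d, nxt))
        have hz2 : distGet ((u :: cur').foldl (stepB arr n level) (d, nxt)).1 z = level + 1 := by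
          rw [hBfold, fp z (by rw [hz']; omega), hz']
        rw [hAstep, levelLoop_preserve arr n fb _ _ _ z (by rw [hz2]; omega), hz2]
  
theorem invD_init (x : Int) : InvD (distSet (Array.replicate 100001 (-1)) x 0) := by
  refine invD_distSet _ _ _ ⟨by simp, fun j => ?_⟩ (by omega)
  rw [Array.getD_eq_getD_getElem?, Array.getElem?_replicate]
  split <;> simp

theorem distGet_init (x : Int) : distGet (distSet (Array.replicate 100001 (-1)) x 0) x = 0 := by
  by_cases h : nIdx x < 100001
  · exact distGet_distSet_same _ _ _ _ rfl (by rw [Array.size_replicate]; exact h)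
  · have hno : distSet (Array.replicate 100001 (-1)) x 0 = Array.replicate 100001 (-1) := by
      simp only [distSet, Array.setIfInBounds]
      rw [dif_neg (by rw [Array.size_replicate]; exact h)]
    rw [hno]
    simp only [distGet, Array.getD_eq_getD_getElem?, Array.getElem?_replicate]
    rw [if_neg h]
    rfl

theorem levelLoop_cons (arr : List Int) (n : Int) (f : Nat) (d : Array Int) (a : Int)
    (l : List Int) (level : Int) :
    levelLoop arr n (f + 1) d (a :: l) level =
      levelLoop arr n f ((a :: l).foldl (stepB arr n level) (d, [])).1
        ((a :: l).foldl (stepB arr n level) (d, [])).2 (level + 1) := rfl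

theorem main_eq (arr : List Int) (n x z : Int) : dhoom_4 arr n x z = dhoom_4_alt arr n x z := by
  have hInv := invD_init x
  have hx0 := distGet_init x
  have hstep : levelLoop arr n (countNeg (distSet (Array.replicate 100001 (-1)) x 0) + 2)
      (distSet (Array.replicate 100001 (-1)) x 0) [x] 0 =
      levelLoop arr n (countNeg (distSet (Array.replicate 100001 (-1)) x 0) + 1)
        ([x].foldl (stepB arr n 0) (distSet (Array.replicate 100001 (-1)) x 0, [])).1
        ([x].foldl (stepB arr n 0) (distSet (Array.replicate 100001 (-1)) x 0, [])).2 1 :=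
    levelLoop_cons arr n _ _ x [] 0
  have hsim := outer_sim arr n z
      (2 * (2 * countNeg (distSet (Array.replicate 100001 (-1)) x 0) + 1) + 0)
      (distSet (Array.replicate 100001 (-1)) x 0) [x] [] 0
      (2 * countNeg (distSet (Array.replicate 100001 (-1)) x 0) + 2)
      (countNeg (distSet (Array.replicate 100001 (-1)) x 0) + 1)
      hInv (by omega)
      (by intro u hu; rcases List.mem_singleton.mp hu with rfl; exact hx0)
      (by simp)
      (by simp only [List.length_cons, List.length_nil]; omega)
      (by simp)
      (by simp)
  simp only [dhoom_4, dhoom_4_alt]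
  rw [hstep]
  simpa using hsim

-- ===== VERDICT (by name: the statement is the Claim_ definition above) =====
theorem dhoom_4_spec : Claim_equal_dhoom_4 := by
  intro arr n x z _ _
  unfold Spec_dhoom_4
  exact main_eq arr n x z
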